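-- pv_equiv track=rewrite | github.com/stankv/Studing | Clear_Code/Comments.py | odometer
-- ===== SOURCE A (Python) =====
-- def odometer(N):
--     time_current = 0        # время движения на конкретном (текущем) участке пути
--     time_elapsed = 0        # полное время движения до текущего участка пути
--     distance_travelled = 0  # общее пройденное расстояние
--     count = 0
--     for i in range(len(N)):
--         if i % 2 == 0:    # эл-ты массива с четными индексами - скорость, с нечетными - пройденный путь
--             velocity_current = N[i]
--         else:
--             time_current = N[i] - time_elapsed
--             time_elapsed = N[i]
--         count = count + 1
--         if count % 2 == 0 and count != 0:
--             distance_travelled += velocity_current * time_current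
--     return distance_travelled
-- ===== SOURCE B (Python) =====
-- def odometer(N):
--     # Abel summation (summation by parts): instead of summing speed * (time - prev_time),
--     # multiply each cumulative timestamp by the DROP in speed after it (0 past the end):
--     #   sum_j v_j*(t_j - t_{j-1})  =  sum_j t_j*(v_j - v_{j+1})
--     times = N[1::2]
--     speeds = N[::2][:len(times)]
--     drops = [v - w for v, w in zip(speeds, speeds[1:] + [0])]
--     return sum(t * d for t, d in zip(times, drops))
-- ===== Notes on version B (the rewrite author's own statement) =====
-- stated objective: alternative
-- what changed: Replaced A's running-previous-timestamp state machine summing speed*(time-prev) by the summation-by-parts identity: slice out the timestamps and paired speeds and sum timestamp*(speed drop to the next segment), with no previous-time accumulator at all.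
import Mathlib
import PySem

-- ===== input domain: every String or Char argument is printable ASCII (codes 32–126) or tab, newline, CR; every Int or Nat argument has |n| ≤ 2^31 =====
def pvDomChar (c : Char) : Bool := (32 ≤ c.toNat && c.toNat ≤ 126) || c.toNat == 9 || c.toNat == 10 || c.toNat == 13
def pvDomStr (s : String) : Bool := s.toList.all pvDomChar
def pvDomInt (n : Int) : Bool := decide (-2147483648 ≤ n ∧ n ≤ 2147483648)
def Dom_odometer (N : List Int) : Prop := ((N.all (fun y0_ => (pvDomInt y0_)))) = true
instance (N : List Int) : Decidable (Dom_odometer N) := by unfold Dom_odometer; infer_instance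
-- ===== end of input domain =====

-- B replaces A's running-previous-timestamp state machine by summation by parts: each
-- timestamp is multiplied by the drop in speed after it (alternative; same O(n) cost).

-- ===== PORT A =====
-- 'for i in range(len(N)): … N[i] …' ported as a foldl over enumerate N; i ≥ 0 so Lean's 'i % 2' agrees with Python's.
def odometer (N : List Int) : Int :=
  (((PySem.List.enumerate N 0).foldl (fun (st : Int × Int × Int × Int × Int) (p : Int × Int) =>
      let (time_current, time_elapsed, distance_travelled, count, velocity_current) := st
      let (i, x) := p
      let (time_current, time_elapsed, velocity_current) :=
        if i % 2 == 0 then (time_current, time_elapsed, x)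
        else (x - time_elapsed, x, velocity_current)
      let count := count + 1
      let distance_travelled :=
        if count % 2 == 0 && count != 0 then distance_travelled + velocity_current * time_current
        else distance_travelled
      (time_current, time_elapsed, distance_travelled, count, velocity_current))
    (0, 0, 0, 0, 0)).2.2.1)

-- ===== PORT B =====
-- hand port of the step-2 slices xs[::2] / xs[1::2] (exact: takes every second element starting at the head)
def everySecond {α : Type} : List α → List α
  | [] => []
  | [x] => [x]
  | x :: _ :: rest => x :: everySecond rest

def odometer_alt (N : List Int) : Int :=
  let times := everySecond (N.drop 1)                      -- N[1::2]
  let speeds := (everySecond N).take times.length          -- N[::2][:len(times)]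
  let drops := (speeds.zip (speeds.drop 1 ++ [0])).map (fun p => p.1 - p.2)
  ((times.zip drops).map (fun p => p.1 * p.2)).sum

-- ===== PRECONDITION & SPEC =====
def Spec_odometer (N : List Int) (out : Int) : Prop := out = odometer_alt N
instance (N : List Int) (out : Int) : Decidable (Spec_odometer N out) := by unfold Spec_odometer; infer_instance

-- ===== CLAIM =====
def Claim_equal_odometer : Prop := ∀ (N : List Int), Dom_odometer N → Spec_odometer N (odometer N)

-- ===== LEMMAS AND PROOFS =====

def stepA (st : Int × Int × Int × Int × Int) (p : Int × Int) : Int × Int × Int × Int × Int :=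
  let (time_current, time_elapsed, distance_travelled, count, velocity_current) := st
  let (i, x) := p
  let (time_current, time_elapsed, velocity_current) :=
    if i % 2 == 0 then (time_current, time_elapsed, x)
    else (x - time_elapsed, x, velocity_current)
  let count := count + 1
  let distance_travelled :=
    if count % 2 == 0 && count != 0 then distance_travelled + velocity_current * time_current
    else distance_travelled
  (time_current, time_elapsed, distance_travelled, count, velocity_current)

-- the interleaved list as (speed, timestamp) pairs; a trailing unpaired speed is dropped
def pairsOf : List Int → List (Int × Int)
  | [] => []
  | [_] => []
  | v :: t :: rest => (v, t) :: pairsOf rest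

-- speed of the first pair (0 if none)
def hs : List (Int × Int) → Int
  | [] => 0
  | p :: _ => p.1

-- Abel form of the distance: Σ t_j * (v_j − v_{j+1}), speeds 0 past the end
def fAbel : List (Int × Int) → Int
  | [] => 0
  | p :: rest => p.2 * (p.1 - hs rest) + fAbel rest

theorem stepA_pair (k : Nat) (tc te d vel v t : Int) :
    stepA (stepA (tc, te, d, (2 * k : Int), vel) ((2 * k : Int), v) ) ((2 * k + 1 : Int), t)
      = (t - te, t, d + v * (t - te), (2 * (k + 1) : Int), v) := by
  have h1 : ((2 * k : Int)) % 2 = 0 := by omega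
  have h2 : ((2 * k + 1 : Int)) % 2 = 1 := by omega
  simp [stepA, h1, h2]
  constructor
  · intro h; omega
  · ring_nf

theorem main_inv (N : List Int) : ∀ (k : Nat) (tc te d vel : Int),
    (((PySem.List.enumerate N (2 * k)).foldl stepA (tc, te, d, (2 * k : Int), vel)).2.2.1)
      = d + fAbel (pairsOf N) - hs (pairsOf N) * te := by
  induction N using pairsOf.induct with
  | case1 => intro k tc te d vel; simp [PySem.List.enumerate_nil, pairsOf, fAbel, hs]
  | case2 v =>
      intro k tc te d vel
      have h1 : ((2 * k : Int)) % 2 = 0 := by omega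
      simp [PySem.List.enumerate_cons, PySem.List.enumerate_nil, pairsOf, fAbel, hs, stepA, h1]
  | case3 v t rest ih =>
      intro k tc te d vel
      rw [PySem.List.enumerate_cons, PySem.List.enumerate_cons]
      simp only [List.foldl_cons]
      rw [stepA_pair k tc te d vel v t]
      have ih' := ih (k + 1) (t - te) t (d + v * (t - te)) v
      push_cast at ih' ⊢
      rw [show (2 * (k : Int) + 1 + 1) = 2 * ((k : Int) + 1) by ring, ih']
      simp [pairsOf, fAbel, hs]
      ring

-- head speed of a plain speed list (0 if none)
def hsV : List Int → Int
  | [] => 0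
  | w :: _ => w

-- Abel sum over separate speed/time lists (stops at the shorter)
def gAbel : List Int → List Int → Int
  | v :: vs, t :: ts => t * (v - hsV vs) + gAbel vs ts
  | _, _ => 0

-- B's zip/map/sum over any speeds/times lists is the two-list Abel sum
theorem zip_sum_eq_gAbel : ∀ (speeds times : List Int),
    ((times.zip ((speeds.zip (speeds.drop 1 ++ [0])).map (fun p => p.1 - p.2))).map
      (fun p => p.1 * p.2)).sum = gAbel speeds times := by
  intro speeds
  induction speeds with
  | nil => intro times; cases times <;> simp [gAbel]
  | cons v vs ih =>
      intro times
      cases times with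
      | nil => simp [gAbel]
      | cons t ts =>
          have hz : (v :: vs).zip (vs ++ [0])
              = (v, hsV vs) :: vs.zip (vs.drop 1 ++ [0]) := by
            cases vs <;> simp [hsV]
          simp only [List.drop_succ_cons, List.drop_zero] at *
          rw [hz]
          simp only [List.map_cons, List.zip_cons_cons, List.sum_cons, gAbel]
          rw [ih ts]

theorem speeds_eq : ∀ (N : List Int),
    (everySecond N).take (everySecond (N.drop 1)).length = (pairsOf N).map Prod.fst := by
  intro N
  induction N using pairsOf.induct with
  | case1 => simp [everySecond, pairsOf]
  | case2 v => simp [everySecond, pairsOf]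
  | case3 v t rest ih =>
      rw [show everySecond (v :: t :: rest) = v :: everySecond rest from by simp [everySecond]]
      rw [show (v :: t :: rest).drop 1 = t :: rest from rfl]
      rw [show everySecond (t :: rest) = t :: everySecond (rest.drop 1) from by
        cases rest <;> simp [everySecond]]
      simp [pairsOf, -List.drop_one, ih]

theorem times_eq : ∀ (N : List Int),
    everySecond (N.drop 1) = (pairsOf N).map Prod.snd := by
  intro N
  induction N using pairsOf.induct with
  | case1 => simp [everySecond, pairsOf]
  | case2 v => simp [everySecond, pairsOf]
  | case3 v t rest ih =>
      rw [show (v :: t :: rest).drop 1 = t :: rest from rfl]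
      rw [show everySecond (t :: rest) = t :: everySecond (rest.drop 1) from by
        cases rest <;> simp [everySecond]]
      simp [pairsOf, -List.drop_one, ih]

theorem gAbel_proj : ∀ (P : List (Int × Int)),
    gAbel (P.map Prod.fst) (P.map Prod.snd) = fAbel P := by
  intro P
  induction P with
  | nil => simp [gAbel, fAbel]
  | cons p rest ih =>
      simp only [List.map_cons, gAbel, fAbel, ih]
      cases rest <;> simp [hsV, hs]

-- B's slices/zips/sum compute fAbel of the pair list
theorem alt_eq_fAbel (N : List Int) : odometer_alt N = fAbel (pairsOf N) := by
  show ((((everySecond (N.drop 1)).zip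
      ((((everySecond N).take (everySecond (N.drop 1)).length).zip
        (((everySecond N).take (everySecond (N.drop 1)).length).drop 1 ++ [0])).map
          (fun p => p.1 - p.2))).map (fun p => p.1 * p.2)).sum) = fAbel (pairsOf N)
  rw [speeds_eq, times_eq, zip_sum_eq_gAbel, gAbel_proj]

-- ===== VERDICT =====
theorem odometer_spec : Claim_equal_odometer := by
  intro N _
  show odometer N = odometer_alt N
  have hA : odometer N = (((PySem.List.enumerate N 0).foldl stepA (0, 0, 0, 0, 0)).2.2.1) := rfl
  rw [hA, alt_eq_fAbel]
  have h := main_inv N 0 0 0 0 0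
  norm_num at h
  exact h
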